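-- pv_equiv track=rewrite | github.com/drewsadik-ctrl/kitchen-compass | scripts/planner/common.py | protein_family
-- ===== SOURCE A (Python) =====
-- from typing import Any
--
-- PROTEIN_SPLIT_CHARS = [",", "/"]
--
-- def protein_family(recipe: dict[str, Any]) -> str:
--     raw = (recipe.get("core_protein") or "").lower()
--     if not raw:
--         return "other"
--     bits = [raw]
--     for char in PROTEIN_SPLIT_CHARS:
--         next_bits = []
--         for bit in bits:
--             next_bits.extend(part.strip() for part in bit.split(char))
--         bits = next_bits
--     families = [bit for bit in bits if bit]
--     if any(bit in {"beef", "steak"} for bit in families):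
--         return "beef"
--     if any(bit in {"chicken"} for bit in families):
--         return "chicken"
--     if any(bit in {"pork", "sausage", "tenderloin", "chops"} for bit in families):
--         return "pork"
--     if any(bit in {"shrimp"} for bit in families):
--         return "shrimp"
--     if any(bit in {"fish", "cod", "salmon"} for bit in families):
--         return "fish"
--     if any(bit in {"pasta", "tomato", "broccoli"} for bit in families):
--         return "non-protein-base"
--     return families[0]
-- ===== SOURCE B (Python) =====
-- from typing import Any
--
-- PROTEIN_SPLIT_CHARS = [",", "/"]
--
-- # keyword -> (priority rank, family label); smaller rank wins, label is constant per rank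
-- PROTEIN_MAP = {
--     "beef": (0, "beef"), "steak": (0, "beef"),
--     "chicken": (1, "chicken"),
--     "pork": (2, "pork"), "sausage": (2, "pork"), "tenderloin": (2, "pork"), "chops": (2, "pork"),
--     "shrimp": (3, "shrimp"),
--     "fish": (4, "fish"), "cod": (4, "fish"), "salmon": (4, "fish"),
--     "pasta": (5, "non-protein-base"), "tomato": (5, "non-protein-base"), "broccoli": (5, "non-protein-base"),
-- }
--
-- def protein_family(recipe: dict[str, Any]) -> str:
--     raw = (recipe.get("core_protein") or "").lower()
--     if not raw:
--         return "other"
--     bits = [raw]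
--     for char in PROTEIN_SPLIT_CHARS:
--         next_bits = []
--         for bit in bits:
--             next_bits.extend(part.strip() for part in bit.split(char))
--         bits = next_bits
--     families = [bit for bit in bits if bit]
--     best = None
--     for bit in families:
--         hit = PROTEIN_MAP.get(bit)
--         if hit is not None and (best is None or hit[0] < best[0]):
--             best = hit
--     return best[1] if best is not None else families[0]
-- ===== Notes on version B (the rewrite author's own statement) =====
-- stated objective: alternative
-- what changed: The six hard-coded membership-test `any(...)` cascades over families are replaced by a single keyword -> (rank, label) table and one fold over families keeping the hit of smallest rank.
import Mathlib
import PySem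

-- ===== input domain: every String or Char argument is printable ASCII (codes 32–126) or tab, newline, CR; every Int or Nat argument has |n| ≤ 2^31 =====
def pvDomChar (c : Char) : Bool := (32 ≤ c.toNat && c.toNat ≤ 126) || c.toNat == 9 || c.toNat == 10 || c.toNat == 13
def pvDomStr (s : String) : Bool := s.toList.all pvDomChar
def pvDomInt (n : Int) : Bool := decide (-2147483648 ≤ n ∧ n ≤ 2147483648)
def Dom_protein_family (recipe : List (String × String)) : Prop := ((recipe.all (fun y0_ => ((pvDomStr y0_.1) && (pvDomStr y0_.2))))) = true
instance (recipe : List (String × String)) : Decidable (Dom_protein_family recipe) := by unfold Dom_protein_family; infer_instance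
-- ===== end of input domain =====

-- B replaces the six-membership-test `any` cascade by one pass over `families` with a
-- keyword → (rank, label) table, keeping the hit of smallest rank (objective: alternative).

-- ===== PORT A =====
-- shared split/strip pipeline of both Pythons: for char in PROTEIN_SPLIT_CHARS: ...
def pfSplitStrip (bits : List String) (c : String) : List String :=
  -- bit.split(c): c is "," or "/", never empty, so split? is always `some`
  bits.foldl (fun acc bit => acc ++ ((PySem.Str.split? bit c).getD []).map PySem.Str.strip) []

-- raw = (recipe.get("core_protein") or "").lower()
def pfRaw (recipe : List (String × String)) : String :=
  PySem.Str.lower (match (PySem.Dict.mk recipe).get? "core_protein" with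
    | some s => if s = "" then "" else s
    | none => "")

def protein_family (recipe : List (String × String)) : String :=
  let raw := pfRaw recipe
  if raw = "" then "other" else
  let bits := [",", "/"].foldl pfSplitStrip [raw]
  let families := bits.filter (fun b => b ≠ "")
  if families.any (fun b => b == "beef" || b == "steak") then "beef"
  else if families.any (fun b => b == "chicken") then "chicken"
  else if families.any (fun b => b == "pork" || b == "sausage" || b == "tenderloin" || b == "chops") then "pork"
  else if families.any (fun b => b == "shrimp") then "shrimp"
  else if families.any (fun b => b == "fish" || b == "cod" || b == "salmon") then "fish"
  else if families.any (fun b => b == "pasta" || b == "tomato" || b == "broccoli") then "non-protein-base"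
  else (PySem.List.pyGet? families 0).getD ""   -- families[0]; [] raises in Python, excluded by Pre_

-- ===== PORT B =====
def PROTEIN_MAP : PySem.Dict String (Int × String) :=
  PySem.Dict.mk [("beef",(0,"beef")),("steak",(0,"beef")),("chicken",(1,"chicken")),
    ("pork",(2,"pork")),("sausage",(2,"pork")),("tenderloin",(2,"pork")),("chops",(2,"pork")),
    ("shrimp",(3,"shrimp")),("fish",(4,"fish")),("cod",(4,"fish")),("salmon",(4,"fish")),
    ("pasta",(5,"non-protein-base")),("tomato",(5,"non-protein-base")),("broccoli",(5,"non-protein-base"))]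

-- loop body: hit = PROTEIN_MAP.get(bit); keep the smaller rank (first one wins ties)
def pfStep (best : Option (Int × String)) (bit : String) : Option (Int × String) :=
  match PySem.Dict.get? PROTEIN_MAP bit with
  | some hit => match best with
      | none => some hit
      | some b => if hit.1 < b.1 then some hit else some b
  | none => best

def protein_family_alt (recipe : List (String × String)) : String :=
  let raw := pfRaw recipe
  if raw = "" then "other" else
  let bits := [",", "/"].foldl pfSplitStrip [raw]
  let families := bits.filter (fun b => b ≠ "")
  match families.foldl pfStep none with
  | some b => b.2
  | none => (PySem.List.pyGet? families 0).getD ""   -- families[0]; [] raises in Python, excluded by Pre_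

-- ===== PRECONDITION & SPEC =====
-- Pre_ excludes exactly the inputs on which A raises IndexError at `families[0]`: a present,
-- non-empty core_protein made up only of separators (',', '/') and whitespace, so that every
-- split-and-stripped piece is empty. B raises there too.
def Pre_protein_family (recipe : List (String × String)) : Prop :=
  (match (PySem.Dict.mk recipe).get? "core_protein" with
   | none => true
   | some s => s == "" || s.toList.any (fun c => !(c == ',' || c == '/' || PySem.Chars.isspace c))) = true
instance (recipe : List (String × String)) : Decidable (Pre_protein_family recipe) := by unfold Pre_protein_family; infer_instance
def pvWitness_protein_family : (List (String × String)) := [("core_protein", "Steak / pasta")]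

def Spec_protein_family (recipe : List (String × String)) (out : String) : Prop := out = protein_family_alt recipe
instance (recipe : List (String × String)) (out : String) : Decidable (Spec_protein_family recipe out) := by unfold Spec_protein_family; infer_instance

-- ===== CLAIM (what is proved, stated in full; the proofs are below) =====
def Claim_equal_protein_family : Prop := ∀ (recipe : List (String × String)), Dom_protein_family recipe → Pre_protein_family recipe → Spec_protein_family recipe (protein_family recipe)

-- ===== LEMMAS AND PROOFS =====
def pfc1 (b : String) : Bool := b == "beef" || b == "steak"
def pfc2 (b : String) : Bool := b == "chicken"
def pfc3 (b : String) : Bool := b == "pork" || b == "sausage" || b == "tenderloin" || b == "chops"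
def pfc4 (b : String) : Bool := b == "shrimp"
def pfc5 (b : String) : Bool := b == "fish" || b == "cod" || b == "salmon"
def pfc6 (b : String) : Bool := b == "pasta" || b == "tomato" || b == "broccoli"

def pfHit (b : String) : Option (Int × String) :=
  if pfc1 b then some (0, "beef")
  else if pfc2 b then some (1, "chicken")
  else if pfc3 b then some (2, "pork")
  else if pfc4 b then some (3, "shrimp")
  else if pfc5 b then some (4, "fish")
  else if pfc6 b then some (5, "non-protein-base")
  else none

theorem pf_get_map (x : String) : PySem.Dict.get? PROTEIN_MAP x = pfHit x := by
  by_cases e0 : x = "beef"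
  · subst e0; decide
  by_cases e1 : x = "steak"
  · subst e1; decide
  by_cases e2 : x = "chicken"
  · subst e2; decide
  by_cases e3 : x = "pork"
  · subst e3; decide
  by_cases e4 : x = "sausage"
  · subst e4; decide
  by_cases e5 : x = "tenderloin"
  · subst e5; decide
  by_cases e6 : x = "chops"
  · subst e6; decide
  by_cases e7 : x = "shrimp"
  · subst e7; decide
  by_cases e8 : x = "fish"
  · subst e8; decide
  by_cases e9 : x = "cod"
  · subst e9; decide
  by_cases e10 : x = "salmon"
  · subst e10; decide
  by_cases e11 : x = "pasta"
  · subst e11; decide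
  by_cases e12 : x = "tomato"
  · subst e12; decide
  by_cases e13 : x = "broccoli"
  · subst e13; decide
  simp [PROTEIN_MAP, PySem.Dict.get?, pfHit, pfc1, pfc2, pfc3, pfc4, pfc5, pfc6,
    e0, e1, e2, e3, e4, e5, e6, e7, e8, e9, e10, e11, e12, e13,
    Ne.symm e0, Ne.symm e1, Ne.symm e2, Ne.symm e3, Ne.symm e4, Ne.symm e5, Ne.symm e6,
    Ne.symm e7, Ne.symm e8, Ne.symm e9, Ne.symm e10, Ne.symm e11, Ne.symm e12, Ne.symm e13]

-- result of continuing the fold from an already-matched accumulator d: the best hit of rank < d.1 in l, else d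
def pfChainP (d : Int × String) (l : List String) : Int × String :=
  if 0 < d.1 ∧ l.any pfc1 then (0, "beef")
  else if 1 < d.1 ∧ l.any pfc2 then (1, "chicken")
  else if 2 < d.1 ∧ l.any pfc3 then (2, "pork")
  else if 3 < d.1 ∧ l.any pfc4 then (3, "shrimp")
  else if 4 < d.1 ∧ l.any pfc5 then (4, "fish")
  else if 5 < d.1 ∧ l.any pfc6 then (5, "non-protein-base")
  else d

theorem pf_fold_some (l : List String) (d : Int × String) :
    l.foldl pfStep (some d) = some (pfChainP d l) := by
  induction l generalizing d with
  | nil => simp [pfChainP]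
  | cons x xs ih =>
    have hm := pf_get_map x
    rw [List.foldl_cons]
    unfold pfHit at hm
    split_ifs at hm with h1 h2 h3 h4 h5 h6
    · simp only [pfc1, Bool.or_eq_true, beq_iff_eq] at h1
      rcases h1 with rfl | rfl <;>
        (simp only [pfStep, hm]
         split_ifs with hr
         · skip
           rw [ih]
           simp [pfChainP, List.any_cons, pfc1, pfc2, pfc3, pfc4, pfc5, pfc6, hr]
         · rw [ih]
           simp [pfChainP, List.any_cons, pfc1, pfc2, pfc3, pfc4, pfc5, pfc6, hr])
    · simp only [pfc2, Bool.or_eq_true, beq_iff_eq] at h2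
      simp only [Bool.not_eq_true] at h1
      rcases h2 with rfl <;>
        (simp only [pfStep, hm]
         split_ifs with hr
         · have d0 : (0:Int) < d.1 := by omega
           rw [ih]
           simp [pfChainP, List.any_cons, pfc1, pfc2, pfc3, pfc4, pfc5, pfc6, d0, hr, h1]
         · rw [ih]
           simp [pfChainP, List.any_cons, pfc1, pfc2, pfc3, pfc4, pfc5, pfc6, hr, h1])
    · simp only [pfc3, Bool.or_eq_true, beq_iff_eq] at h3
      simp only [Bool.not_eq_true] at h1 h2
      rcases h3 with ((rfl | rfl) | rfl) | rfl <;>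
        (simp only [pfStep, hm]
         split_ifs with hr
         · have d0 : (0:Int) < d.1 := by omega
           have d1 : (1:Int) < d.1 := by omega
           rw [ih]
           simp [pfChainP, List.any_cons, pfc1, pfc2, pfc3, pfc4, pfc5, pfc6, d0, d1, hr, h1, h2]
         · rw [ih]
           simp [pfChainP, List.any_cons, pfc1, pfc2, pfc3, pfc4, pfc5, pfc6, hr, h1, h2])
    · simp only [pfc4, Bool.or_eq_true, beq_iff_eq] at h4
      simp only [Bool.not_eq_true] at h1 h2 h3
      rcases h4 with rfl <;>
        (simp only [pfStep, hm]
         split_ifs with hr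
         · have d0 : (0:Int) < d.1 := by omega
           have d1 : (1:Int) < d.1 := by omega
           have d2 : (2:Int) < d.1 := by omega
           rw [ih]
           simp [pfChainP, List.any_cons, pfc1, pfc2, pfc3, pfc4, pfc5, pfc6, d0, d1, d2, hr, h1, h2, h3]
         · rw [ih]
           simp [pfChainP, List.any_cons, pfc1, pfc2, pfc3, pfc4, pfc5, pfc6, hr, h1, h2, h3])
    · simp only [pfc5, Bool.or_eq_true, beq_iff_eq] at h5
      simp only [Bool.not_eq_true] at h1 h2 h3 h4
      rcases h5 with (rfl | rfl) | rfl <;>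
        (simp only [pfStep, hm]
         split_ifs with hr
         · have d0 : (0:Int) < d.1 := by omega
           have d1 : (1:Int) < d.1 := by omega
           have d2 : (2:Int) < d.1 := by omega
           have d3 : (3:Int) < d.1 := by omega
           rw [ih]
           simp [pfChainP, List.any_cons, pfc1, pfc2, pfc3, pfc4, pfc5, pfc6, d0, d1, d2, d3, hr, h1, h2, h3, h4]
         · rw [ih]
           simp [pfChainP, List.any_cons, pfc1, pfc2, pfc3, pfc4, pfc5, pfc6, hr, h1, h2, h3, h4])
    · simp only [pfc6, Bool.or_eq_true, beq_iff_eq] at h6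
      simp only [Bool.not_eq_true] at h1 h2 h3 h4 h5
      rcases h6 with (rfl | rfl) | rfl <;>
        (simp only [pfStep, hm]
         split_ifs with hr
         · have d0 : (0:Int) < d.1 := by omega
           have d1 : (1:Int) < d.1 := by omega
           have d2 : (2:Int) < d.1 := by omega
           have d3 : (3:Int) < d.1 := by omega
           have d4 : (4:Int) < d.1 := by omega
           rw [ih]
           simp [pfChainP, List.any_cons, pfc1, pfc2, pfc3, pfc4, pfc5, pfc6, d0, d1, d2, d3, d4, hr, h1, h2, h3, h4, h5]
         · rw [ih]
           simp [pfChainP, List.any_cons, pfc1, pfc2, pfc3, pfc4, pfc5, pfc6, hr, h1, h2, h3, h4, h5])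
    · simp only [Bool.not_eq_true] at h1 h2 h3 h4 h5 h6
      simp only [pfStep, hm]
      rw [ih]
      simp [pfChainP, List.any_cons, h1, h2, h3, h4, h5, h6]

-- A's cascade over l with fallback fb
def pfChainS (l : List String) (fb : String) : String :=
  if l.any pfc1 then "beef"
  else if l.any pfc2 then "chicken"
  else if l.any pfc3 then "pork"
  else if l.any pfc4 then "shrimp"
  else if l.any pfc5 then "fish"
  else if l.any pfc6 then "non-protein-base"
  else fb

theorem pf_fold_none (l : List String) (fb : String) :
    (match l.foldl pfStep none with
     | some b => b.2
     | none => fb) = pfChainS l fb := by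
  induction l with
  | nil => simp [pfChainS]
  | cons x xs ih =>
    have hm := pf_get_map x
    rw [List.foldl_cons]
    unfold pfHit at hm
    split_ifs at hm with h1 h2 h3 h4 h5 h6
    · simp only [pfc1, Bool.or_eq_true, beq_iff_eq] at h1
      rcases h1 with rfl | rfl <;>
        (simp only [pfStep, hm]
         rw [pf_fold_some]
         simp [pfChainP, pfChainS, List.any_cons, pfc1, pfc2, pfc3, pfc4, pfc5, pfc6]
         try (split_ifs <;> rfl))
    · simp only [pfc2, Bool.or_eq_true, beq_iff_eq] at h2
      simp only [Bool.not_eq_true] at h1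
      rcases h2 with rfl <;>
        (simp only [pfStep, hm]
         rw [pf_fold_some]
         simp [pfChainP, pfChainS, List.any_cons, pfc1, pfc2, pfc3, pfc4, pfc5, pfc6, h1]
         try (split_ifs <;> rfl))
    · simp only [pfc3, Bool.or_eq_true, beq_iff_eq] at h3
      simp only [Bool.not_eq_true] at h1 h2
      rcases h3 with ((rfl | rfl) | rfl) | rfl <;>
        (simp only [pfStep, hm]
         rw [pf_fold_some]
         simp [pfChainP, pfChainS, List.any_cons, pfc1, pfc2, pfc3, pfc4, pfc5, pfc6, h1, h2]
         try (split_ifs <;> rfl))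
    · simp only [pfc4, Bool.or_eq_true, beq_iff_eq] at h4
      simp only [Bool.not_eq_true] at h1 h2 h3
      rcases h4 with rfl <;>
        (simp only [pfStep, hm]
         rw [pf_fold_some]
         simp [pfChainP, pfChainS, List.any_cons, pfc1, pfc2, pfc3, pfc4, pfc5, pfc6, h1, h2, h3]
         try (split_ifs <;> rfl))
    · simp only [pfc5, Bool.or_eq_true, beq_iff_eq] at h5
      simp only [Bool.not_eq_true] at h1 h2 h3 h4
      rcases h5 with (rfl | rfl) | rfl <;>
        (simp only [pfStep, hm]
         rw [pf_fold_some]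
         simp [pfChainP, pfChainS, List.any_cons, pfc1, pfc2, pfc3, pfc4, pfc5, pfc6, h1, h2, h3, h4]
         try (split_ifs <;> rfl))
    · simp only [pfc6, Bool.or_eq_true, beq_iff_eq] at h6
      simp only [Bool.not_eq_true] at h1 h2 h3 h4 h5
      rcases h6 with (rfl | rfl) | rfl <;>
        (simp only [pfStep, hm]
         rw [pf_fold_some]
         simp [pfChainP, pfChainS, List.any_cons, pfc1, pfc2, pfc3, pfc4, pfc5, pfc6, h1, h2, h3, h4, h5]
         try (split_ifs <;> rfl))
    · simp only [Bool.not_eq_true] at h1 h2 h3 h4 h5 h6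
      simp only [pfStep, hm]
      rw [ih]
      simp [pfChainS, List.any_cons, h1, h2, h3, h4, h5, h6]

-- ===== VERDICT (by name: the statement is the Claim_ definition above) =====
theorem protein_family_spec : Claim_equal_protein_family := by
  intro recipe _ _
  unfold Spec_protein_family protein_family protein_family_alt
  by_cases h : pfRaw recipe = ""
  · simp [h]
  · simp only [h, if_neg h]
    rw [pf_fold_none]
    rfl
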